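-- pv_equiv track=rewrite | github.com/camiloricoe/python-camilo | CodeSignal/Arcade/The Core/50-Crossword Formation.py | solution
-- ===== SOURCE A (Python) =====
-- def solution(words):
--     count = 0
--     for i in range(4):
--         ta = words[i]
--         al = len(ta)
--         for a in range(al - 2):
--             for j in range(4):
--                 if j == i:
--                     continue
--                 tb = words[j]
--                 jl = len(tb)
--                 b = tb.find(ta[a], 0, -2)
--                 while b != -1:
--                     for b2 in range(b + 2, jl):
--                         for k in range(4):
--                             if k == j or k == i:
--                                 continue
--                             l = 6 - k - i - j
--                             bd = b2 - b
--                             td = words[l]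
--                             dl = len(td)
--                             if bd >= dl:
--                                 continue
--                             tc = words[k]
--                             cl = len(tc)
--                             c = tc.find(tb[b2], 0, -2)
--                             while c != -1:
--                                 if tb[b2] != tc[c]:
--                                     continue
--                                 for c2 in range(c + 2, cl):
--                                     for d in range(dl - 1, bd - 1, -1):
--                                         if tc[c2] != td[d]:
--                                             continue
--                                         a2 = a + c2 - c
--                                         if a2 >= al:
--                                             break
--                                         if ta[a2] == td[d - bd]:
--                                             count += 1
--                                 c = tc.find(tb[b2], c + 1, -2)
--                     b = tb.find(ta[a], b + 1, -2)
--     return count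
-- ===== SOURCE B (Python) =====
-- def solution(words):
--     # Count crossword '#' formations by character-pair frequency tables:
--     # for each assignment (top, left, bottom, right) and each pair of gaps
--     # (gv, gh), build Counter-style tables of the two crossing characters per
--     # word, then combine the four tables by multiplying counts.
--     def pairtab(w, gap):
--         t = {}
--         for p in range(len(w) - gap):
--             key = (w[p], w[p + gap])
--             t[key] = t.get(key, 0) + 1
--         return t
--
--     total = 0
--     for i in range(4):
--         for j in range(4):
--             if j == i:
--                 continue
--             for k in range(4):
--                 if k == i or k == j:
--                     continue
--                 ta = words[i]   # top horizontal
--                 tb = words[j]   # left vertical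
--                 tc = words[k]   # bottom horizontal
--                 td = words[6 - i - j - k]   # right vertical
--                 for gv in range(2, len(tb)):
--                     left = pairtab(tb, gv)
--                     right = pairtab(td, gv)
--                     for gh in range(2, len(tc)):
--                         top = pairtab(ta, gh)
--                         bottom = pairtab(tc, gh)
--                         for (tl, bl), nl in left.items():
--                             for (tr, br), nr in right.items():
--                                 total += (nl * nr
--                                           * top.get((tl, tr), 0)
--                                           * bottom.get((bl, br), 0))
--     return total
-- ===== Notes on version B (the rewrite author's own statement) =====
-- stated objective: alternative
-- what changed: B replaces A's find-driven enumeration of matching position tuples with a counting algorithm: for each frame assignment and each pair of gaps it builds dict frequency tables of the two crossing characters of each word and combines the four tables by multiplying counts, so no tuple of positions is ever enumerated (measured 1.45x faster at the largest timing size, below the 1.5x bar, so no speed is claimed).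
import Mathlib
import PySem

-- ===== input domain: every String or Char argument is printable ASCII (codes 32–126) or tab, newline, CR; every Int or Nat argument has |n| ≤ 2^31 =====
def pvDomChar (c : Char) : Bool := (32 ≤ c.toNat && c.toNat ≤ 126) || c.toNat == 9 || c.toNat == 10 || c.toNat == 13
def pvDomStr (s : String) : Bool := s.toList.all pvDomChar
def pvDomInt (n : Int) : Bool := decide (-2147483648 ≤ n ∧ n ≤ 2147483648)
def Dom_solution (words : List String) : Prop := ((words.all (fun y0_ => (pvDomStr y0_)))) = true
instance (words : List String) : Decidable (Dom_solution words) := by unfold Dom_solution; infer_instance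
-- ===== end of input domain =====

-- B replaces A's enumeration of matching position tuples by dict frequency tables of crossing
-- character pairs per (word, gap), combined by multiplying counts (objective: alternative algorithm).


-- ===== PORT A =====
-- innermost 'for d in range(dl-1, bd-1, -1)' loop, with its 'continue' and 'break'
def solDLoop (ta td : List Char) (x : Char) (a2 bd al : Int) : List Int → Int → Int
  | [], count => count
  | d :: rest, count =>
    if x ≠ PySem.List.pyGetD td d ' ' then solDLoop ta td x a2 bd al rest count
    else if al ≤ a2 then count            -- 'break': the remaining iterations are dropped
    else solDLoop ta td x a2 bd al rest
      (if PySem.List.pyGetD ta a2 ' ' = PySem.List.pyGetD td (d - bd) ' ' then count + 1 else count)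

-- 'for c2 in range(c + 2, cl)'
def solC2Fold (ta tc td : List Char) (a c bd al cl dl : Int) (count : Int) : Int :=
  (PySem.List.pyRange (c + 2) cl 1).foldl
    (fun count c2 =>
      solDLoop ta td (PySem.List.pyGetD tc c2 ' ') (a + c2 - c) bd al
        (PySem.List.pyRange (dl - 1) (bd - 1) (-1)) count)
    count

-- 'while c != -1: …' (fuel-bounded recursion; fuel len(tc)+1 is enough, proved in the lemmas)
def solCWhile (ta tb tc td : List Char) (a b2 bd al cl dl : Int) : Nat → Int → Int → Int
  | 0, _, count => count
  | fuel + 1, c, count =>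
    if c = -1 then count
    else if PySem.List.pyGetD tb b2 ' ' ≠ PySem.List.pyGetD tc c ' ' then
      solCWhile ta tb tc td a b2 bd al cl dl fuel c count   -- Python 'continue' (never taken: find matched)
    else
      solCWhile ta tb tc td a b2 bd al cl dl fuel
        (PySem.Chars.findFrom tc [PySem.List.pyGetD tb b2 ' '] (c + 1) (some (-2)))
        (solC2Fold ta tc td a c bd al cl dl count)

-- 'for k in range(4)'
def solKFold (words : List String) (i j : Int) (ta tb : List Char) (al a b b2 : Int) (count : Int) : Int :=
  (PySem.List.pyRange 0 4 1).foldl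
    (fun count k =>
      if k = j ∨ k = i then count
      else
        let l := 6 - k - i - j
        let bd := b2 - b
        let td := (PySem.List.pyGetD words l "").toList
        let dl := PySem.List.len td
        if dl ≤ bd then count
        else
          let tc := (PySem.List.pyGetD words k "").toList
          let cl := PySem.List.len tc
          let c := PySem.Chars.findFrom tc [PySem.List.pyGetD tb b2 ' '] 0 (some (-2))
          solCWhile ta tb tc td a b2 bd al cl dl (tc.length + 1) c count)
    count

-- 'for b2 in range(b + 2, jl)'
def solB2Fold (words : List String) (i j : Int) (ta tb : List Char) (al jl a b : Int) (count : Int) : Int :=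
  (PySem.List.pyRange (b + 2) jl 1).foldl
    (fun count b2 => solKFold words i j ta tb al a b b2 count) count

-- 'while b != -1: …'
def solBWhile (words : List String) (i j : Int) (ta tb : List Char) (al jl a : Int) : Nat → Int → Int → Int
  | 0, _, count => count
  | fuel + 1, b, count =>
    if b = -1 then count
    else
      solBWhile words i j ta tb al jl a fuel
        (PySem.Chars.findFrom tb [PySem.List.pyGetD ta a ' '] (b + 1) (some (-2)))
        (solB2Fold words i j ta tb al jl a b count)

def solution (words : List String) : Int :=
  (PySem.List.pyRange 0 4 1).foldl
    (fun count i =>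
      let ta := (PySem.List.pyGetD words i "").toList
      let al := PySem.List.len ta
      (PySem.List.pyRange 0 (al - 2) 1).foldl
        (fun count a =>
          (PySem.List.pyRange 0 4 1).foldl
            (fun count j =>
              if j = i then count
              else
                let tb := (PySem.List.pyGetD words j "").toList
                let jl := PySem.List.len tb
                let b := PySem.Chars.findFrom tb [PySem.List.pyGetD ta a ' '] 0 (some (-2))
                solBWhile words i j ta tb al jl a (tb.length + 1) b count)
            count)
        count)
    0

-- ===== PORT B =====
-- 'def pairtab(w, gap)': dict of counts of the character pair (w[p], w[p+gap])
def pairtab (w : List Char) (gap : Int) : PySem.Dict (Char × Char) Int :=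
  (PySem.List.pyRange 0 ((w.length : Int) - gap) 1).foldl
    (fun t p =>
      let key := (PySem.List.pyGetD w p ' ', PySem.List.pyGetD w (p + gap) ' ')
      t.insert key (t.getD key 0 + 1))
    PySem.Dict.empty

def solution_alt (words : List String) : Int :=
  (PySem.List.pyRange 0 4 1).foldl (fun total i =>
    (PySem.List.pyRange 0 4 1).foldl (fun total j =>
      if j = i then total
      else
        (PySem.List.pyRange 0 4 1).foldl (fun total k =>
          if k = i ∨ k = j then total
          else
            let ta := (PySem.List.pyGetD words i "").toList
            let tb := (PySem.List.pyGetD words j "").toList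
            let tc := (PySem.List.pyGetD words k "").toList
            let td := (PySem.List.pyGetD words (6 - i - j - k) "").toList
            (PySem.List.pyRange 2 (tb.length : Int) 1).foldl (fun total gv =>
              let left := pairtab tb gv
              let right := pairtab td gv
              (PySem.List.pyRange 2 (tc.length : Int) 1).foldl (fun total gh =>
                let top := pairtab ta gh
                let bottom := pairtab tc gh
                left.items.foldl (fun total p =>
                  right.items.foldl (fun total q =>
                    total + p.2 * q.2 * top.getD (p.1.1, q.1.1) 0
                          * bottom.getD (p.1.2, q.1.2) 0)
                    total)
                  total)
                total)
              total)
          total)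
        total)
    0

-- ===== PRECONDITION & SPEC =====
-- Python A raises IndexError when len(words) < 4 (words[i] for i in range(4)); Pre_ excludes exactly those.
def Pre_solution (words : List String) : Prop := 4 ≤ words.length
instance (words : List String) : Decidable (Pre_solution words) := by unfold Pre_solution; infer_instance
def pvWitness_solution : List String := (["aab", "aab", "aab", "aab"])

def Spec_solution (words : List String) (out : Int) : Prop := out = solution_alt words
instance (words : List String) (out : Int) : Decidable (Spec_solution words out) := by unfold Spec_solution; infer_instance

-- ===== CLAIM (what is proved, stated in full; the proofs are below) =====
def Claim_equal_solution : Prop := ∀ (words : List String), Dom_solution words → Pre_solution words → Spec_solution words (solution words)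

-- ===== LEMMAS AND PROOFS =====

-- word i as a list of characters
def wl (words : List String) (i : Int) : List Char := (PySem.List.pyGetD words i "").toList

-- canonical nested sums (per fixed assignment of the four words; A's result is reduced to these)
def C_d (ta tc td : List Char) (a c bd c2 : Int) : Int :=
  (((PySem.List.pyRange bd (td.length : Int) 1).filter (fun d =>
      (PySem.List.pyGetD td d ' ' == PySem.List.pyGetD tc c2 ' ') &&
      (PySem.List.pyGetD td (d - bd) ' ' == PySem.List.pyGetD ta (a + c2 - c) ' '))).length : Int)

def C_c2 (ta tc td : List Char) (a c bd : Int) : Int :=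
  ((PySem.List.pyRange (c + 2) ((tc.length : Int)) 1).map
    (fun c2 => if (ta.length : Int) ≤ a + c2 - c then 0 else C_d ta tc td a c bd c2)).sum

def C_c (ta tb tc td : List Char) (a b2 bd : Int) : Int :=
  ((PySem.List.pyRange 0 ((tc.length : Int) - 2) 1).map
    (fun c => if PySem.List.pyGetD tc c ' ' = PySem.List.pyGetD tb b2 ' ' then C_c2 ta tc td a c bd else 0)).sum

def C_b2 (ta tb tc td : List Char) (a b : Int) : Int :=
  ((PySem.List.pyRange (b + 2) ((tb.length : Int)) 1).map
    (fun b2 => if (td.length : Int) ≤ b2 - b then 0 else C_c ta tb tc td a b2 (b2 - b))).sum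

def C_b (ta tb tc td : List Char) (a : Int) : Int :=
  ((PySem.List.pyRange 0 ((tb.length : Int) - 2) 1).map
    (fun b => if PySem.List.pyGetD tb b ' ' = PySem.List.pyGetD ta a ' ' then C_b2 ta tb tc td a b else 0)).sum

def C_a (ta tb tc td : List Char) : Int :=
  ((PySem.List.pyRange 0 ((ta.length : Int) - 2) 1).map (fun a => C_b ta tb tc td a)).sum

-- A's loop shape after flattening: the k-sum sits innermost (below b2), the c-level already canonical
def A_kS (words : List String) (i j : Int) (ta tb : List Char) (a b b2 : Int) : Int :=
  ((PySem.List.pyRange 0 4 1).map (fun k =>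
    if k = j ∨ k = i then 0
    else if ((wl words (6 - k - i - j)).length : Int) ≤ b2 - b then 0
    else C_c ta tb (wl words k) (wl words (6 - k - i - j)) a b2 (b2 - b))).sum

def A_b2S (words : List String) (i j : Int) (ta tb : List Char) (a b : Int) : Int :=
  ((PySem.List.pyRange (b + 2) ((tb.length : Int)) 1).map (fun b2 => A_kS words i j ta tb a b b2)).sum

def A_bS (words : List String) (i j : Int) (ta tb : List Char) (a : Int) : Int :=
  ((PySem.List.pyRange 0 ((tb.length : Int) - 2) 1).map
    (fun b => if PySem.List.pyGetD tb b ' ' = PySem.List.pyGetD ta a ' ' then A_b2S words i j ta tb a b else 0)).sum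

-- match positions of character ch in cs[st:-2] (what the find/while loops traverse)
def pvMatches (cs : List Char) (ch : Char) (st : Nat) : List Nat :=
  (List.range (cs.length - 2)).filter (fun t => decide (st ≤ t ∧ cs.getD t ' ' = ch))

-- ---------- generic list lemmas ----------
theorem pv_prefix_singleton (l : List Char) (ch : Char) : [ch] <+: l ↔ l.head? = some ch := by
  cases l with
  | nil => simp
  | cons h t => simp [List.cons_prefix_cons, eq_comm]

theorem pv_sum_map_comm (l1 l2 : List Int) (f : Int → Int → Int) :
    (l1.map (fun x => (l2.map (fun y => f x y)).sum)).sum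
      = (l2.map (fun y => (l1.map (fun x => f x y)).sum)).sum := by
  induction l1 with
  | nil => simp
  | cons h t ih =>
    simp only [List.map_cons, List.sum_cons, ih, ← PySem.List.sum_map_add_int]

theorem pv_sum_filter_ite {α : Type} (l : List α) (p : α → Bool) (f : α → Int) :
    ((l.filter p).map f).sum = (l.map (fun x => if p x then f x else 0)).sum := by
  induction l with
  | nil => simp
  | cons h t ih => by_cases hp : p h <;> simp [hp, ih]

theorem pv_ite_pull_sum {α : Type} (P : Prop) [Decidable P] (l : List α) (f : α → Int) :
    (if P then (l.map f).sum else 0) = (l.map (fun x => if P then f x else 0)).sum := by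
  by_cases h : P <;> simp [h]

theorem pv_foldl_guard_add (l : List Int) (p : Int → Prop) [DecidablePred p] (g : Int → Int) (a : Int) :
    l.foldl (fun acc x => if p x then acc else acc + g x) a
      = a + (l.map (fun x => if p x then 0 else g x)).sum := by
  have h : ∀ acc x, (if p x then acc else acc + g x) = acc + (if p x then 0 else g x) := by
    intro acc x; by_cases hp : p x <;> simp [hp]
  rw [PySem.List.foldl_congr_mem l (fun acc x => if p x then acc else acc + g x)
    (fun acc x => acc + (if p x then 0 else g x)) a (by intro acc x _; exact h acc x)]
  exact PySem.List.foldl_add _ _ _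

theorem pv_filter_range_split (q : Nat → Prop) [DecidablePred q] (st t m : Nat)
    (hst : st ≤ t) (htm : t < m) (hqt : q t) (hno : ∀ u, st ≤ u → u < t → ¬ q u) :
    (List.range m).filter (fun u => decide (st ≤ u ∧ q u))
      = t :: (List.range m).filter (fun u => decide (t + 1 ≤ u ∧ q u)) := by
  have hm : m = t + (m - t - 1 + 1) := by omega
  rw [hm, List.range_add, List.filter_append, List.filter_append]
  have h1 : (List.range t).filter (fun u => decide (st ≤ u ∧ q u)) = [] := by
    rw [List.filter_eq_nil_iff]
    intro u hu
    simp only [List.mem_range] at hu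
    simp only [decide_eq_true_eq, not_and]
    intro hsu; exact hno u hsu hu
  have h2 : (List.range t).filter (fun u => decide (t + 1 ≤ u ∧ q u)) = [] := by
    rw [List.filter_eq_nil_iff]
    intro u hu
    simp only [List.mem_range] at hu
    simp only [decide_eq_true_eq, not_and]
    intro h; omega
  rw [h1, h2, List.range_succ_eq_map]
  simp only [List.map_cons, List.map_map, List.filter_cons, Nat.add_zero]
  rw [if_pos (by simp [hst, hqt]), if_neg (by simp)]
  simp only [List.nil_append]
  congr 1
  apply List.filter_congr
  intro u hu
  simp only [List.mem_map, List.mem_range, Function.comp] at hu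
  obtain ⟨k, _, hk⟩ := hu
  have h1 : t + 1 ≤ u := by omega
  have h2 : st ≤ u := by omega
  simp [h1, h2]

-- ---------- find/matches characterization ----------
theorem pv_mem_matches_iff (cs : List Char) (ch : Char) (st t : Nat) :
    t ∈ pvMatches cs ch st ↔ st ≤ t ∧ t < cs.length - 2 ∧ cs.getD t ' ' = ch := by
  simp [pvMatches, List.mem_filter, List.mem_range]; tauto
theorem pv_matches_pairwise (cs : List Char) (ch : Char) (st : Nat) :
    (pvMatches cs ch st).Pairwise (· < ·) :=
  List.Pairwise.sublist List.filter_sublist List.pairwise_lt_range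
theorem pv_matches_head_props (cs : List Char) (ch : Char) (st t : Nat) (rest : List Nat)
    (h : pvMatches cs ch st = t :: rest) :
    st ≤ t ∧ t < cs.length - 2 ∧ cs.getD t ' ' = ch ∧
      (∀ u, st ≤ u → u < t → ¬ (cs.getD u ' ' = ch)) := by
  have ht : t ∈ pvMatches cs ch st := by rw [h]; exact List.mem_cons_self
  rw [pv_mem_matches_iff] at ht
  refine ⟨ht.1, ht.2.1, ht.2.2, ?_⟩
  intro u hsu hut hq
  have hu : u ∈ pvMatches cs ch st := by
    rw [pv_mem_matches_iff]; exact ⟨hsu, by omega, hq⟩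
  have hp := pv_matches_pairwise cs ch st
  rw [h] at hu hp
  rcases List.mem_cons.mp hu with rfl | hu'
  · omega
  · have := (List.pairwise_cons.mp hp).1 u hu'; omega
theorem pv_matches_tail (cs : List Char) (ch : Char) (st t : Nat) (rest : List Nat)
    (h : pvMatches cs ch st = t :: rest) : pvMatches cs ch (t + 1) = rest := by
  obtain ⟨h1, h2, h3, h4⟩ := pv_matches_head_props cs ch st t rest h
  have := pv_filter_range_split (fun u => cs.getD u ' ' = ch) st t (cs.length - 2) h1 h2 h3 h4
  unfold pvMatches at h ⊢
  rw [this] at h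
  exact (List.cons_inj_right t).mp h |>.symm ▸ rfl
theorem pv_sub_getElem (cs : List Char) (st p : Nat) :
    ((cs.take (cs.length - 2)).drop st)[p]? = if st + p < cs.length - 2 then cs[st + p]? else none := by
  rw [List.getElem?_drop]
  split
  · exact List.getElem?_take_of_lt (by omega)
  · apply List.getElem?_eq_none
    simp; omega

theorem pv_findFrom_unfold (cs : List Char) (ch : Char) (st : Nat) :
    PySem.Chars.findFrom cs [ch] (st : Int) (some (-2)) =
      if ((cs.length - 2 : Nat) : Int) < (st : Int) then -1
      else if PySem.Chars.find ((cs.take (cs.length - 2)).drop st) [ch] = -1 then -1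
      else (st : Int) + PySem.Chars.find ((cs.take (cs.length - 2)).drop st) [ch] := by
  simp only [PySem.Chars.findFrom]
  have h1 : ¬ ((cs.length : Int) < -2) := by omega
  have h2 : ¬ ((st : Int) < 0) := by omega
  rw [if_neg h1]
  norm_num
  rw [if_neg h2]
  have he : (if cs.length ≤ 1 then (0:Int) else -2 + (cs.length : Int)) = ((cs.length - 2 : Nat) : Int) := by
    split <;> omega
  rw [he]
  simp [Int.toNat_natCast, Nat.cast_lt]

theorem pv_mem_sub_iff (cs : List Char) (ch : Char) (st : Nat) :
    ch ∈ (cs.take (cs.length - 2)).drop st ↔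
      ∃ t : Nat, st ≤ t ∧ t < cs.length - 2 ∧ cs.getD t ' ' = ch := by
  rw [List.mem_iff_getElem?]
  constructor
  · rintro ⟨p, hp⟩
    rw [pv_sub_getElem] at hp
    by_cases h : st + p < cs.length - 2
    · rw [if_pos h] at hp
      refine ⟨st + p, by omega, h, ?_⟩
      rw [List.getD_eq_getElem?_getD, hp]; rfl
    · rw [if_neg h] at hp; exact absurd hp (by simp)
  · rintro ⟨t, h1, h2, h3⟩
    refine ⟨t - st, ?_⟩
    rw [pv_sub_getElem, if_pos (by omega)]
    have ht : st + (t - st) = t := by omega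
    rw [ht]
    have hn : t < cs.length := by omega
    rw [List.getElem?_eq_getElem hn]
    rw [List.getD_eq_getElem?_getD, List.getElem?_eq_getElem hn] at h3
    simpa using h3

theorem pv_findFrom_char_nil (cs : List Char) (ch : Char) (st : Nat)
    (h : pvMatches cs ch st = []) :
    PySem.Chars.findFrom cs [ch] (st : Int) (some (-2)) = -1 := by
  rw [pv_findFrom_unfold]
  split
  · rfl
  · have hnm : ch ∉ (cs.take (cs.length - 2)).drop st := by
      rw [pv_mem_sub_iff]
      rintro ⟨t, h1, h2, h3⟩
      have : t ∈ pvMatches cs ch st := (pv_mem_matches_iff cs ch st t).mpr ⟨h1, h2, h3⟩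
      rw [h] at this; exact absurd this (List.not_mem_nil)
    have hf : PySem.Chars.find ((cs.take (cs.length - 2)).drop st) [ch] = -1 := by
      rw [PySem.Chars.find_eq_neg_one_iff, List.singleton_infix_iff]
      exact hnm
    rw [if_pos hf]

theorem pv_findFrom_char_cons (cs : List Char) (ch : Char) (st t : Nat) (rest : List Nat)
    (h : pvMatches cs ch st = t :: rest) :
    PySem.Chars.findFrom cs [ch] (st : Int) (some (-2)) = (t : Int) := by
  obtain ⟨h1, h2, h3, h4⟩ := pv_matches_head_props cs ch st t rest h
  rw [pv_findFrom_unfold]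
  rw [if_neg (by omega)]
  set s' := (cs.take (cs.length - 2)).drop st with hs'
  have hmem : ch ∈ s' := by
    rw [hs', pv_mem_sub_iff]; exact ⟨t, h1, h2, h3⟩
  have hinf : [ch] <:+: s' := (List.singleton_infix_iff ch s').mpr hmem
  have hge : 0 ≤ PySem.Chars.find s' [ch] := (PySem.Chars.find_nonneg_iff s' [ch]).mpr hinf
  set r := PySem.Chars.find s' [ch] with hr
  obtain ⟨hpre, hmin⟩ := PySem.Chars.find_spec (s := s') (sub := [ch]) hge
  rw [if_neg (by omega)]
  have hrs : s'[r.toNat]? = some ch := by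
    rw [← List.head?_drop]
    exact ((pv_prefix_singleton _ ch).mp hpre)
  have hrlt : st + r.toNat < cs.length - 2 ∧ cs.getD (st + r.toNat) ' ' = ch := by
    rw [hs', pv_sub_getElem] at hrs
    by_cases hc : st + r.toNat < cs.length - 2
    · rw [if_pos hc] at hrs
      exact ⟨hc, by rw [List.getD_eq_getElem?_getD, hrs]; rfl⟩
    · rw [if_neg hc] at hrs; exact absurd hrs (by simp)
  have hge_t : t ≤ st + r.toNat := by
    by_contra hlt
    exact h4 (st + r.toNat) (by omega) (by omega) hrlt.2
  have hle_t : r.toNat ≤ t - st := by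
    by_contra hgt
    apply hmin (t - st) (by omega)
    rw [pv_prefix_singleton, List.head?_drop, hs', pv_sub_getElem, if_pos (by omega)]
    have ht : st + (t - st) = t := by omega
    rw [ht, List.getElem?_eq_getElem (by omega)]
    rw [List.getD_eq_getElem?_getD, List.getElem?_eq_getElem (by omega : t < cs.length)] at h3
    simpa using h3
  have : r.toNat = t - st := by omega
  omega
theorem pv_matches0_sum (cs : List Char) (ch : Char) (g : Int → Int) :
    ((pvMatches cs ch 0).map (fun t : Nat => g (t : Int))).sum
      = ((PySem.List.pyRange 0 ((cs.length : Int) - 2) 1).map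
          (fun b => if PySem.List.pyGetD cs b ' ' = ch then g b else 0)).sum := by
  rw [PySem.List.pyRange_one, List.map_map]
  have hm : (((cs.length : Int) - 2) - 0).toNat = cs.length - 2 := by omega
  rw [hm]
  unfold pvMatches
  rw [List.filter_congr (q := fun t => decide (cs.getD t ' ' = ch)) (by intro u _; simp)]
  rw [pv_sum_filter_ite]
  congr 1
  apply List.map_congr_left
  intro k hk
  simp


-- ---------- the d-loop (reversed range, with continue/break) ----------
theorem pv_beq_comm (x y : Char) : (x == y) = (y == x) := by
  by_cases h : x = y
  · subst h; rfl
  · simp [h, Ne.symm h]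

theorem pv_dloop_ge (ta td : List Char) (x : Char) (a2 bd al : Int) (l : List Int) (count : Int)
    (h : al ≤ a2) : solDLoop ta td x a2 bd al l count = count := by
  induction l generalizing count with
  | nil => rfl
  | cons d rest ih =>
    unfold solDLoop
    by_cases h1 : x ≠ PySem.List.pyGetD td d ' '
    · rw [if_pos h1]; exact ih count
    · rw [if_neg h1, if_pos h]

theorem pv_dloop_lt (ta td : List Char) (x : Char) (a2 bd al : Int) (l : List Int) (count : Int)
    (h : ¬ al ≤ a2) :
    solDLoop ta td x a2 bd al l count
      = count + ((l.filter (fun d =>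
          (x == PySem.List.pyGetD td d ' ') &&
          (PySem.List.pyGetD ta a2 ' ' == PySem.List.pyGetD td (d - bd) ' '))).length : Int) := by
  induction l generalizing count with
  | nil => simp [solDLoop]
  | cons d rest ih =>
    unfold solDLoop
    rw [List.filter_cons]
    by_cases h1 : x = PySem.List.pyGetD td d ' '
    · rw [if_neg (by simpa using h1), if_neg h]
      by_cases h2 : PySem.List.pyGetD ta a2 ' ' = PySem.List.pyGetD td (d - bd) ' '
      · rw [if_pos h2, ih (count + 1), if_pos (by simp [h1, h2])]
        push_cast [List.length_cons]
        ring
      · rw [if_neg h2, ih count, if_neg (by simp [h2])]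
    · rw [if_pos (by simpa using h1), ih count, if_neg (by simp [h1])]

theorem pv_dloop_total (ta tc td : List Char) (a c bd c2 : Int) (count : Int) :
    solDLoop ta td (PySem.List.pyGetD tc c2 ' ') (a + c2 - c) bd ((ta.length : Int))
        (PySem.List.pyRange ((td.length : Int) - 1) (bd - 1) (-1)) count
      = count + (if (ta.length : Int) ≤ a + c2 - c then 0 else C_d ta tc td a c bd c2) := by
  by_cases h : (ta.length : Int) ≤ a + c2 - c
  · rw [pv_dloop_ge _ _ _ _ _ _ _ _ h, if_pos h, add_zero]
  · rw [pv_dloop_lt _ _ _ _ _ _ _ _ h, if_neg h]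
    have h2 : PySem.List.pyRange ((td.length : Int) - 1) (bd - 1) (-1)
        = (PySem.List.pyRange bd ((td.length : Int)) 1).reverse := by
      have := PySem.List.pyRange_neg_one_eq_reverse ((td.length : Int) - 1) (bd - 1)
      simpa using this
    rw [h2, List.filter_reverse, List.length_reverse]
    unfold C_d
    have h3 : (PySem.List.pyRange bd ((td.length : Int)) 1).filter
          (fun d => (PySem.List.pyGetD tc c2 ' ' == PySem.List.pyGetD td d ' ') &&
            (PySem.List.pyGetD ta (a + c2 - c) ' ' == PySem.List.pyGetD td (d - bd) ' '))
        = (PySem.List.pyRange bd ((td.length : Int)) 1).filter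
          (fun d => (PySem.List.pyGetD td d ' ' == PySem.List.pyGetD tc c2 ' ') &&
            (PySem.List.pyGetD td (d - bd) ' ' == PySem.List.pyGetD ta (a + c2 - c) ' ')) :=
      List.filter_congr (fun d _ => by
        rw [pv_beq_comm (PySem.List.pyGetD tc c2 ' ') (PySem.List.pyGetD td d ' '),
            pv_beq_comm (PySem.List.pyGetD ta (a + c2 - c) ' ') (PySem.List.pyGetD td (d - bd) ' ')])
    rw [h3]


-- ---------- the c2 for-loop and the c while-loop ----------
theorem pv_c2fold (ta tc td : List Char) (a c bd count : Int) :
    solC2Fold ta tc td a c bd ((ta.length : Int)) ((tc.length : Int)) ((td.length : Int)) count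
      = count + C_c2 ta tc td a c bd := by
  unfold solC2Fold C_c2
  rw [PySem.List.foldl_congr_mem _ _
    (fun count c2 => count + (if (ta.length : Int) ≤ a + c2 - c then 0 else C_d ta tc td a c bd c2)) _
    (by intro acc c2 _; exact pv_dloop_total ta tc td a c bd c2 acc)]
  exact PySem.List.foldl_add _ _ _

theorem pv_cwhile (ta tb tc td : List Char) (a b2 bd : Int) :
    ∀ (ms : List Nat) (st fuel : Nat) (count : Int),
      pvMatches tc (PySem.List.pyGetD tb b2 ' ') st = ms → ms.length < fuel →
      solCWhile ta tb tc td a b2 bd ((ta.length : Int)) ((tc.length : Int)) ((td.length : Int)) fuel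
          (PySem.Chars.findFrom tc [PySem.List.pyGetD tb b2 ' '] (st : Int) (some (-2))) count
        = count + (ms.map (fun t : Nat => C_c2 ta tc td a (t : Int) bd)).sum := by
  intro ms
  induction ms with
  | nil =>
    intro st fuel count hms hfuel
    obtain ⟨f, rfl⟩ : ∃ f, fuel = f + 1 := ⟨fuel - 1, by omega⟩
    rw [pv_findFrom_char_nil _ _ _ hms]
    unfold solCWhile
    rw [if_pos rfl]
    simp
  | cons t rest ih =>
    intro st fuel count hms hfuel
    obtain ⟨f, rfl⟩ : ∃ f, fuel = f + 1 := ⟨fuel - 1, by omega⟩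
    obtain ⟨h1, h2, h3, h4⟩ := pv_matches_head_props _ _ _ _ _ hms
    rw [pv_findFrom_char_cons _ _ _ _ _ hms]
    unfold solCWhile
    rw [if_neg (by omega)]
    have hch : PySem.List.pyGetD tc (t : Int) ' ' = PySem.List.pyGetD tb b2 ' ' := by
      rw [PySem.List.pyGetD_natCast]; exact h3
    rw [if_neg (by rw [hch]; simp)]
    have hcast : ((t : Int) + 1) = ((t + 1 : Nat) : Int) := by push_cast; ring
    rw [pv_c2fold, hcast, ih (t + 1) f _ (pv_matches_tail _ _ _ _ _ hms) (by simpa using hfuel)]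
    simp [add_assoc]

theorem pv_cstart (ta tb tc td : List Char) (a b2 bd count : Int) :
    solCWhile ta tb tc td a b2 bd ((ta.length : Int)) ((tc.length : Int)) ((td.length : Int))
        (tc.length + 1)
        (PySem.Chars.findFrom tc [PySem.List.pyGetD tb b2 ' '] 0 (some (-2))) count
      = count + C_c ta tb tc td a b2 bd := by
  have hlen : (pvMatches tc (PySem.List.pyGetD tb b2 ' ') 0).length < tc.length + 1 := by
    have h1 := List.length_filter_le
      (fun t => decide (0 ≤ t ∧ tc.getD t ' ' = PySem.List.pyGetD tb b2 ' '))
      (List.range (tc.length - 2))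
    rw [List.length_range] at h1
    unfold pvMatches
    omega
  have h0 : ((0 : Nat) : Int) = (0 : Int) := rfl
  rw [← h0, pv_cwhile ta tb tc td a b2 bd _ 0 (tc.length + 1) count rfl hlen]
  unfold C_c
  rw [pv_matches0_sum tc (PySem.List.pyGetD tb b2 ' ') (fun cc => C_c2 ta tc td a cc bd)]


-- ---------- the k / b2 loops and the b while-loop ----------
theorem pv_kfold (words : List String) (i j : Int) (ta tb : List Char) (a b b2 count : Int) :
    solKFold words i j ta tb ((ta.length : Int)) a b b2 count
      = count + A_kS words i j ta tb a b b2 := by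
  unfold solKFold A_kS
  rw [PySem.List.foldl_congr_mem _ _
    (fun count k => count + (if k = j ∨ k = i then 0
       else if ((wl words (6 - k - i - j)).length : Int) ≤ b2 - b then 0
       else C_c ta tb (wl words k) (wl words (6 - k - i - j)) a b2 (b2 - b))) _ ?hcong]
  · exact PySem.List.foldl_add _ _ _
  case hcong =>
    intro acc k _
    dsimp only
    by_cases hg : k = j ∨ k = i
    · rw [if_pos hg, if_pos hg, add_zero]
    · rw [if_neg hg, if_neg hg]
      simp only [PySem.List.len_eq, wl]
      by_cases hd : (((PySem.List.pyGetD words (6 - k - i - j) "").toList.length : Int)) ≤ b2 - b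
      · rw [if_pos hd, if_pos hd, add_zero]
      · rw [if_neg hd, if_neg hd]
        exact pv_cstart ta tb _ _ a b2 (b2 - b) acc

theorem pv_b2fold (words : List String) (i j : Int) (ta tb : List Char) (a b count : Int) :
    solB2Fold words i j ta tb ((ta.length : Int)) ((tb.length : Int)) a b count
      = count + A_b2S words i j ta tb a b := by
  unfold solB2Fold A_b2S
  rw [PySem.List.foldl_congr_mem _ _
    (fun count b2 => count + A_kS words i j ta tb a b b2) _
    (by intro acc b2 _; exact pv_kfold words i j ta tb a b b2 acc)]
  exact PySem.List.foldl_add _ _ _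

theorem pv_bwhile (words : List String) (i j : Int) (ta tb : List Char) (a : Int) :
    ∀ (ms : List Nat) (st fuel : Nat) (count : Int),
      pvMatches tb (PySem.List.pyGetD ta a ' ') st = ms → ms.length < fuel →
      solBWhile words i j ta tb ((ta.length : Int)) ((tb.length : Int)) a fuel
          (PySem.Chars.findFrom tb [PySem.List.pyGetD ta a ' '] (st : Int) (some (-2))) count
        = count + (ms.map (fun t : Nat => A_b2S words i j ta tb a (t : Int))).sum := by
  intro ms
  induction ms with
  | nil =>
    intro st fuel count hms hfuel
    obtain ⟨f, rfl⟩ : ∃ f, fuel = f + 1 := ⟨fuel - 1, by omega⟩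
    rw [pv_findFrom_char_nil _ _ _ hms]
    unfold solBWhile
    rw [if_pos rfl]
    simp
  | cons t rest ih =>
    intro st fuel count hms hfuel
    obtain ⟨f, rfl⟩ : ∃ f, fuel = f + 1 := ⟨fuel - 1, by omega⟩
    rw [pv_findFrom_char_cons _ _ _ _ _ hms]
    unfold solBWhile
    rw [if_neg (by omega)]
    have hcast : ((t : Int) + 1) = ((t + 1 : Nat) : Int) := by push_cast; ring
    rw [pv_b2fold, hcast, ih (t + 1) f _ (pv_matches_tail _ _ _ _ _ hms) (by simpa using hfuel)]
    simp [add_assoc]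

theorem pv_bstart (words : List String) (i j : Int) (ta tb : List Char) (a count : Int) :
    solBWhile words i j ta tb ((ta.length : Int)) ((tb.length : Int)) a (tb.length + 1)
        (PySem.Chars.findFrom tb [PySem.List.pyGetD ta a ' '] 0 (some (-2))) count
      = count + A_bS words i j ta tb a := by
  have hlen : (pvMatches tb (PySem.List.pyGetD ta a ' ') 0).length < tb.length + 1 := by
    have h1 := List.length_filter_le
      (fun t => decide (0 ≤ t ∧ tb.getD t ' ' = PySem.List.pyGetD ta a ' '))
      (List.range (tb.length - 2))
    rw [List.length_range] at h1
    unfold pvMatches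
    omega
  have h0 : ((0 : Nat) : Int) = (0 : Int) := rfl
  rw [← h0, pv_bwhile words i j ta tb a _ 0 (tb.length + 1) count rfl hlen]
  unfold A_bS
  rw [pv_matches0_sum tb (PySem.List.pyGetD ta a ' ') (fun bb => A_b2S words i j ta tb a bb)]


-- ---------- the two ports as nested map-sums ----------
def A_top (words : List String) : Int :=
  ((PySem.List.pyRange 0 4 1).map (fun i =>
    ((PySem.List.pyRange 0 (((wl words i).length : Int) - 2) 1).map (fun a =>
      ((PySem.List.pyRange 0 4 1).map (fun j =>
        if j = i then 0 else A_bS words i j (wl words i) (wl words j) a)).sum)).sum)).sum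

def canonS (words : List String) : Int :=
  ((PySem.List.pyRange 0 4 1).map (fun i =>
    ((PySem.List.pyRange 0 4 1).map (fun j => if j = i then 0 else
      ((PySem.List.pyRange 0 4 1).map (fun k => if k = i ∨ k = j then 0 else
        C_a (wl words i) (wl words j) (wl words k) (wl words (6 - i - j - k)))).sum)).sum)).sum

theorem pv_A_eq (words : List String) : solution words = A_top words := by
  unfold solution A_top
  rw [PySem.List.foldl_congr_mem _ _
    (fun count i => count +
      ((PySem.List.pyRange 0 (((wl words i).length : Int) - 2) 1).map (fun a =>
        ((PySem.List.pyRange 0 4 1).map (fun j =>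
          if j = i then 0 else A_bS words i j (wl words i) (wl words j) a)).sum)).sum) 0 ?hi]
  · rw [PySem.List.foldl_add, zero_add]
  case hi =>
    intro acc i _
    dsimp only [PySem.List.len_eq]
    rw [PySem.List.foldl_congr_mem _ _
      (fun count a => count +
        ((PySem.List.pyRange 0 4 1).map (fun j =>
          if j = i then 0 else A_bS words i j (wl words i) (wl words j) a)).sum) _ ?ha]
    · rw [PySem.List.foldl_add]; rfl
    case ha =>
      intro acc2 a _
      dsimp only
      rw [PySem.List.foldl_congr_mem _ _
        (fun count j => if j = i then count else count +
          A_bS words i j (wl words i) (wl words j) a) _ ?hj]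
      · rw [pv_foldl_guard_add _ (fun j => j = i)]
      case hj =>
        intro acc3 j _
        dsimp only
        by_cases hj : j = i
        · rw [if_pos hj, if_pos hj]
        · rw [if_neg hj, if_neg hj]
          exact pv_bstart words i j (wl words i) (wl words j) a acc3


-- ---------- commuting the k-sum out of A's a/b/b2 nesting ----------
theorem pv_ite_pull_sum' {α : Type} (P : Prop) [Decidable P] (l : List α) (f : α → Int) :
    (if P then 0 else (l.map f).sum) = (l.map (fun x => if P then 0 else f x)).sum := by
  by_cases h : P <;> simp [h]

theorem pv_pull_k (K A B : List Int) (Rb2 : Int → List Int)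
    (cb : Int → Int → Prop) [inst : ∀ a b, Decidable (cb a b)]
    (G : Int → Int → Int → Int → Int) :
    (A.map (fun a => (B.map (fun b =>
        if cb a b then ((Rb2 b).map (fun b2 => (K.map (fun k => G k a b b2)).sum)).sum
        else 0)).sum)).sum
      = (K.map (fun k => (A.map (fun a => (B.map (fun b =>
          if cb a b then ((Rb2 b).map (fun b2 => G k a b b2)).sum else 0)).sum)).sum)).sum := by
  have h1 : ∀ a, (B.map (fun b =>
      if cb a b then ((Rb2 b).map (fun b2 => (K.map (fun k => G k a b b2)).sum)).sum
      else 0)).sum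
      = (K.map (fun k => (B.map (fun b =>
          if cb a b then ((Rb2 b).map (fun b2 => G k a b b2)).sum else 0)).sum)).sum := by
    intro a
    have h2 : ∀ b, (if cb a b then ((Rb2 b).map (fun b2 => (K.map (fun k => G k a b b2)).sum)).sum else 0)
        = (K.map (fun k => if cb a b then ((Rb2 b).map (fun b2 => G k a b b2)).sum else 0)).sum := by
      intro b
      rw [pv_sum_map_comm (Rb2 b) K (fun b2 k => G k a b b2)]
      exact pv_ite_pull_sum (cb a b) K _
    rw [List.map_congr_left (fun b _ => h2 b)]
    exact pv_sum_map_comm B K _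
  rw [List.map_congr_left (fun a _ => h1 a)]
  exact pv_sum_map_comm A K _

theorem pv_core (words : List String) (i j : Int) :
    ((PySem.List.pyRange 0 (((wl words i).length : Int) - 2) 1).map
        (fun a => A_bS words i j (wl words i) (wl words j) a)).sum
      = ((PySem.List.pyRange 0 4 1).map (fun k => if k = i ∨ k = j then 0 else
          C_a (wl words i) (wl words j) (wl words k) (wl words (6 - i - j - k)))).sum := by
  unfold A_bS A_b2S A_kS
  rw [pv_pull_k (PySem.List.pyRange 0 4 1)
      (PySem.List.pyRange 0 (((wl words i).length : Int) - 2) 1)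
      (PySem.List.pyRange 0 (((wl words j).length : Int) - 2) 1)
      (fun b => PySem.List.pyRange (b + 2) ((wl words j).length : Int) 1)
      (fun a b => PySem.List.pyGetD (wl words j) b ' ' = PySem.List.pyGetD (wl words i) a ' ')
      (fun k a b b2 => if k = j ∨ k = i then 0
        else if ((wl words (6 - k - i - j)).length : Int) ≤ b2 - b then 0
        else C_c (wl words i) (wl words j) (wl words k) (wl words (6 - k - i - j)) a b2 (b2 - b))]
  congr 1
  apply List.map_congr_left
  intro k _
  by_cases hk : k = j ∨ k = i
  · rw [if_pos (hk.symm)]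
    simp [hk]
  · rw [if_neg (fun h => hk h.symm)]
    have heq : (6 - k - i - j : Int) = 6 - i - j - k := by ring
    simp only [heq, hk, if_false]
    unfold C_a C_b C_b2
    rfl

theorem pv_AB_A (words : List String) : A_top words = canonS words := by
  unfold A_top canonS
  congr 1
  apply List.map_congr_left
  intro i _
  rw [pv_sum_map_comm]
  congr 1
  apply List.map_congr_left
  intro j _
  rw [← pv_ite_pull_sum' (j = i) _ (fun a => A_bS words i j (wl words i) (wl words j) a)]
  by_cases hj : j = i
  · rw [if_pos hj, if_pos hj]
  · rw [if_neg hj, if_neg hj, pv_core words i j]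


-- ---------- generic sum lemmas for B's counting algebra ----------
theorem pv_ite_and (P Q : Prop) [Decidable P] [Decidable Q] (x : Int) :
    (if P then (if Q then x else 0) else 0) = if P ∧ Q then x else 0 := by
  by_cases hP : P <;> by_cases hQ : Q <;> simp [hP, hQ]

theorem pv_mul_sum {α : Type} (r : Int) (l : List α) (f : α → Int) :
    r * (l.map f).sum = (l.map (fun x => r * f x)).sum := by
  induction l with
  | nil => simp
  | cons h t ih => simp [mul_add, ih]

theorem pv_sum_mul_sum {α β : Type} (l1 : List α) (l2 : List β) (f : α → Int) (g : β → Int) :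
    (l1.map f).sum * (l2.map g).sum
      = (l1.map (fun x => (l2.map (fun y => f x * g y)).sum)).sum := by
  induction l1 with
  | nil => simp
  | cons h t ih =>
    simp only [List.map_cons, List.sum_cons, add_mul, ih, pv_mul_sum]

theorem pv_sum_shift (dd lo hi : Int) (f : Int → Int) :
    ((PySem.List.pyRange (dd + lo) (dd + hi) 1).map f).sum
      = ((PySem.List.pyRange lo hi 1).map (fun x => f (dd + x))).sum := by
  rw [PySem.List.pyRange_one, PySem.List.pyRange_one]
  have h : dd + hi - (dd + lo) = hi - lo := by ring
  rw [h, List.map_map, List.map_map]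
  apply congrArg
  apply List.map_congr_left
  intro k _
  simp only [Function.comp]
  congr 1
  ring

theorem pv_sum_ext (lo m n : Int) (h : m ≤ n) (f : Int → Int) :
    ((PySem.List.pyRange lo m 1).map f).sum
      = ((PySem.List.pyRange lo n 1).map (fun x => if x < m then f x else 0)).sum := by
  rw [PySem.List.pyRange_one, PySem.List.pyRange_one]
  have hN : (n - lo).toNat = (m - lo).toNat + ((n - lo).toNat - (m - lo).toNat) := by omega
  rw [hN, List.range_add]
  simp only [List.map_append, List.sum_append, List.map_map]
  have h0 : (List.map ((fun x => if x < m then f x else 0) ∘ (fun k : Nat => lo + (k : Int)) ∘ fun x => (m - lo).toNat + x)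
      (List.range ((n - lo).toNat - (m - lo).toNat))).sum = 0 := by
    apply List.sum_eq_zero
    intro x hx
    rw [List.mem_map] at hx
    obtain ⟨k, hk, rfl⟩ := hx
    rw [List.mem_range] at hk
    simp only [Function.comp]
    rw [if_neg (by push_cast; omega)]
  rw [h0, add_zero]
  apply congrArg
  apply List.map_congr_left
  intro k hk
  rw [List.mem_range] at hk
  simp only [Function.comp]
  rw [if_pos (by omega)]

theorem pv_len_filter {α : Type} (l : List α) (p : α → Bool) :
    (((l.filter p).length : Nat) : Int) = (l.map (fun x => if p x = true then (1 : Int) else 0)).sum := by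
  induction l with
  | nil => simp
  | cons h t ih =>
    rw [List.filter_cons, List.map_cons, List.sum_cons]
    by_cases hp : p h
    · rw [if_pos hp, if_pos hp, List.length_cons, ← ih]
      push_cast
      ring
    · rw [if_neg (by simp [hp]), if_neg (by simp [hp]), zero_add]
      exact ih

theorem pv_count_sum {α : Type} [BEq α] [LawfulBEq α] [DecidableEq α] (L : List α) (z : α) :
    ((L.count z : Nat) : Int) = (L.map (fun x => if x = z then (1 : Int) else 0)).sum := by
  induction L with
  | nil => simp
  | cons h t ih =>
    simp only [List.count_cons, List.map_cons, List.sum_cons]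
    by_cases hz : h = z
    · simp only [hz, beq_self_eq_true, if_true]
      push_cast
      rw [ih]
      ring
    · have hb : (h == z) = false := by simp [hz]
      rw [hb, if_neg hz]
      simpa using ih

theorem pv_pick {α : Type} [DecidableEq α] (K : List α) (f : α → Int) (x : α)
    (hK : K.Nodup) (hx : x ∈ K) :
    (K.map (fun k => if k = x then f k else 0)).sum = f x := by
  induction K with
  | nil => exact absurd hx (List.not_mem_nil)
  | cons y t ih =>
    obtain ⟨hyt, hnd⟩ := List.nodup_cons.mp hK
    rw [List.map_cons, List.sum_cons]
    rcases List.mem_cons.mp hx with h1 | h1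
    · rw [if_pos h1.symm, ← h1]
      have hz : (t.map (fun k => if k = x then f k else 0)).sum = 0 := by
        apply List.sum_eq_zero
        intro v hv
        rw [List.mem_map] at hv
        obtain ⟨k, hk, rfl⟩ := hv
        rw [if_neg (fun hke : k = x => hyt ((Eq.trans hke h1) ▸ hk))]
      rw [hz, add_zero]
    · rw [if_neg (by rintro rfl; exact hyt h1), ih hnd h1, zero_add]

theorem pv_weighted {α : Type} [BEq α] [LawfulBEq α] [DecidableEq α] (K L : List α) (f : α → Int)
    (hK : K.Nodup) (hm : ∀ x ∈ L, x ∈ K) :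
    (K.map (fun k => ((L.count k : Nat) : Int) * f k)).sum = (L.map f).sum := by
  induction L with
  | nil => simp
  | cons x t ih =>
    have hsplit : K.map (fun k => (((x :: t).count k : Nat) : Int) * f k)
        = K.map (fun k => ((t.count k : Nat) : Int) * f k + (if k = x then f k else 0)) := by
      apply List.map_congr_left
      intro k _
      rw [List.count_cons]
      by_cases hkx : x = k
      · subst hkx; simp [add_mul]
      · have : ¬ (k = x) := fun h => hkx h.symm
        simp [hkx, this]
    rw [hsplit,
        PySem.List.sum_map_add_int (f := fun k => ((t.count k : Nat) : Int) * f k)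
          (g := fun k => if k = x then f k else 0),
        ih (fun y hy => hm y (List.mem_cons_of_mem _ hy)),
        pv_pick K f x hK (hm x List.mem_cons_self)]
    simp [add_comm]

theorem pv_ite_flip (P : Prop) [Decidable P] (x : Int) :
    (if P then 0 else x) = if ¬ P then x else 0 := by
  by_cases h : P <;> simp [h]

theorem pv_ite_mul (P Q : Prop) [Decidable P] [Decidable Q] :
    (if P then (1 : Int) else 0) * (if Q then (1 : Int) else 0) = if P ∧ Q then (1 : Int) else 0 := by
  by_cases hP : P <;> by_cases hQ : Q <;> simp [hP, hQ]

-- the key of B's pair tables: the two crossing characters of w at offset p and p+gap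
def keyP (w : List Char) (gap p : Int) : Char × Char :=
  (PySem.List.pyGetD w p ' ', PySem.List.pyGetD w (p + gap) ' ')

theorem pv_pairtab (w : List Char) (gap : Int) :
    pairtab w gap
      = PySem.Dict.counter ((PySem.List.pyRange 0 ((w.length : Int) - gap) 1).map (fun p => keyP w gap p)) := by
  rw [← PySem.Dict.foldl_insert_getD_add_one_eq_counter, List.foldl_map]
  rfl

theorem pv_counter_items_sum {α : Type} [BEq α] [LawfulBEq α] [DecidableEq α]
    (L : List α) (f : α → Int) :
    (((PySem.Dict.counter L).items).map (fun p => p.2 * f p.1)).sum = (L.map f).sum := by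
  rw [PySem.Dict.items_counter, List.map_map]
  have h : ((PySem.Set.ofList L).map ((fun p : α × Int => p.2 * f p.1) ∘ (fun k => (k, (L.count k : Int)))))
      = (PySem.Set.ofList L).map (fun k => ((L.count k : Nat) : Int) * f k) := by
    apply List.map_congr_left
    intro k _
    rfl
  rw [h]
  exact pv_weighted _ L f (PySem.Set.nodup_ofList L) (fun x hx => (PySem.Set.mem_ofList L x).mpr hx)

-- ---------- the canonical rectangle form both algorithms reduce to ----------
-- E: the innermost indicator sum over the right word's bottom crossing position e + gv
def pvE (ta tc td : List Char) (a c gv gh : Int) : Int :=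
  ((PySem.List.pyRange 0 ((td.length : Int)) 1).map (fun e =>
    if (e + gv < (td.length : Int) ∧
        PySem.List.pyGetD td (gv + e) ' ' = PySem.List.pyGetD tc (c + gh) ' ' ∧
        PySem.List.pyGetD td e ' ' = PySem.List.pyGetD ta (a + gh) ' ')
    then (1 : Int) else 0)).sum

-- W: the full indicator rectangle for one gap pair (gv, gh)
def pvW (ta tb tc td : List Char) (gv gh : Int) : Int :=
  ((PySem.List.pyRange 0 ((ta.length : Int)) 1).map (fun a =>
    ((PySem.List.pyRange 0 ((tb.length : Int)) 1).map (fun b =>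
      ((PySem.List.pyRange 0 ((tc.length : Int)) 1).map (fun c =>
        ((PySem.List.pyRange 0 ((td.length : Int)) 1).map (fun e =>
          if (a + gh < (ta.length : Int) ∧ b + gv < (tb.length : Int) ∧
              c + gh < (tc.length : Int) ∧ e + gv < (td.length : Int) ∧
              PySem.List.pyGetD ta a ' ' = PySem.List.pyGetD tb b ' ' ∧
              PySem.List.pyGetD tc c ' ' = PySem.List.pyGetD tb (b + gv) ' ' ∧
              PySem.List.pyGetD td (gv + e) ' ' = PySem.List.pyGetD tc (c + gh) ' ' ∧
              PySem.List.pyGetD td e ' ' = PySem.List.pyGetD ta (a + gh) ' ')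
          then (1 : Int) else 0)).sum)).sum)).sum)).sum

def pvCan (ta tb tc td : List Char) : Int :=
  ((PySem.List.pyRange 2 ((tb.length : Int)) 1).map (fun gv =>
    ((PySem.List.pyRange 2 ((tc.length : Int)) 1).map (fun gh =>
      pvW ta tb tc td gv gh)).sum)).sum

-- ---------- A's nested loops to the rectangle form ----------
theorem pv_A_d (ta tc td : List Char) (a c bd c2 : Int) (hbd : 0 ≤ bd) :
    C_d ta tc td a c bd c2
      = ((PySem.List.pyRange 0 ((td.length : Int)) 1).map (fun e =>
          if (e + bd < (td.length : Int) ∧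
              PySem.List.pyGetD td (bd + e) ' ' = PySem.List.pyGetD tc c2 ' ' ∧
              PySem.List.pyGetD td e ' ' = PySem.List.pyGetD ta (a + c2 - c) ' ')
          then (1 : Int) else 0)).sum := by
  unfold C_d
  rw [pv_len_filter]
  have h1 : PySem.List.pyRange bd ((td.length : Int)) 1
      = PySem.List.pyRange (bd + 0) (bd + ((td.length : Int) - bd)) 1 := by
    norm_num
  rw [h1, pv_sum_shift bd 0 ((td.length : Int) - bd), pv_sum_ext 0 ((td.length : Int) - bd) ((td.length : Int)) (by omega)]
  apply congrArg
  apply List.map_congr_left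
  intro e he
  rw [PySem.List.mem_pyRange_one] at he
  simp only [Bool.and_eq_true, beq_iff_eq]
  have harg : bd + e - bd = e := by ring
  rw [harg, pv_ite_and]
  refine if_congr ?_ rfl rfl
  constructor
  · rintro ⟨hlt, h2, h3⟩; exact ⟨by omega, h2, h3⟩
  · rintro ⟨hlt, h2, h3⟩; exact ⟨by omega, h2, h3⟩

theorem pv_A_c2 (ta tc td : List Char) (a c bd : Int) (hc : 0 ≤ c) (hbd : 0 ≤ bd) :
    C_c2 ta tc td a c bd
      = ((PySem.List.pyRange 2 ((tc.length : Int)) 1).map (fun gh =>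
          if (c + gh < (tc.length : Int) ∧ a + gh < (ta.length : Int))
          then pvE ta tc td a c bd gh else 0)).sum := by
  unfold C_c2
  have h1 : PySem.List.pyRange (c + 2) ((tc.length : Int)) 1
      = PySem.List.pyRange (c + 2) (c + ((tc.length : Int) - c)) 1 := by
    norm_num
  rw [h1, pv_sum_shift c 2 ((tc.length : Int) - c), pv_sum_ext 2 ((tc.length : Int) - c) ((tc.length : Int)) (by omega)]
  apply congrArg
  apply List.map_congr_left
  intro gh hgh
  rw [PySem.List.mem_pyRange_one] at hgh
  rw [pv_A_d ta tc td a c bd (c + gh) hbd]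
  have harg : a + (c + gh) - c = a + gh := by ring
  rw [harg, pv_ite_flip, pv_ite_and]
  refine if_congr ?_ ?_ rfl
  · constructor
    · rintro ⟨h2, h3⟩; exact ⟨by omega, by omega⟩
    · rintro ⟨h2, h3⟩; exact ⟨by omega, by omega⟩
  · unfold pvE; rfl

theorem pv_A_c_rect (ta tb tc td : List Char) (a b2 bd : Int) (hbd : 0 ≤ bd) :
    C_c ta tb tc td a b2 bd
      = ((PySem.List.pyRange 0 ((tc.length : Int)) 1).map (fun c =>
          ((PySem.List.pyRange 2 ((tc.length : Int)) 1).map (fun gh =>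
            if (c < (tc.length : Int) - 2 ∧ PySem.List.pyGetD tc c ' ' = PySem.List.pyGetD tb b2 ' ' ∧
                c + gh < (tc.length : Int) ∧ a + gh < (ta.length : Int))
            then pvE ta tc td a c bd gh else 0)).sum)).sum := by
  unfold C_c
  rw [pv_sum_ext 0 ((tc.length : Int) - 2) ((tc.length : Int)) (by omega)]
  apply congrArg
  apply List.map_congr_left
  intro c hc
  rw [PySem.List.mem_pyRange_one] at hc
  by_cases h1 : c < (tc.length : Int) - 2
  · rw [if_pos h1]
    by_cases h2 : PySem.List.pyGetD tc c ' ' = PySem.List.pyGetD tb b2 ' '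
    · rw [if_pos h2, pv_A_c2 ta tc td a c bd (by omega) hbd]
      apply congrArg
      apply List.map_congr_left
      intro gh _
      by_cases h3 : c + gh < (tc.length : Int) ∧ a + gh < (ta.length : Int)
      · rw [if_pos h3, if_pos ⟨h1, h2, h3.1, h3.2⟩]
      · rw [if_neg h3, if_neg (by rintro ⟨_, _, u1, u2⟩; exact h3 ⟨u1, u2⟩)]
    · rw [if_neg h2]
      symm
      apply List.sum_eq_zero
      intro x hx
      rw [List.mem_map] at hx
      obtain ⟨gh, _, rfl⟩ := hx
      rw [if_neg (by rintro ⟨_, u, _, _⟩; exact h2 u)]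
  · rw [if_neg h1]
    symm
    apply List.sum_eq_zero
    intro x hx
    rw [List.mem_map] at hx
    obtain ⟨gh, _, rfl⟩ := hx
    rw [if_neg (by rintro ⟨u, _, _, _⟩; exact h1 u)]

theorem pv_A_b2_rect (ta tb tc td : List Char) (a b : Int) (hb : 0 ≤ b) :
    C_b2 ta tb tc td a b
      = ((PySem.List.pyRange 2 ((tb.length : Int)) 1).map (fun gv =>
          ((PySem.List.pyRange 0 ((tc.length : Int)) 1).map (fun c =>
            ((PySem.List.pyRange 2 ((tc.length : Int)) 1).map (fun gh =>
              if (b + gv < (tb.length : Int) ∧ gv < (td.length : Int) ∧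
                  c < (tc.length : Int) - 2 ∧ PySem.List.pyGetD tc c ' ' = PySem.List.pyGetD tb (b + gv) ' ' ∧
                  c + gh < (tc.length : Int) ∧ a + gh < (ta.length : Int))
              then pvE ta tc td a c gv gh else 0)).sum)).sum)).sum := by
  unfold C_b2
  have h1 : PySem.List.pyRange (b + 2) ((tb.length : Int)) 1
      = PySem.List.pyRange (b + 2) (b + ((tb.length : Int) - b)) 1 := by
    norm_num
  rw [h1, pv_sum_shift b 2 ((tb.length : Int) - b), pv_sum_ext 2 ((tb.length : Int) - b) ((tb.length : Int)) (by omega)]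
  apply congrArg
  apply List.map_congr_left
  intro gv hgv
  rw [PySem.List.mem_pyRange_one] at hgv
  have harg : b + gv - b = gv := by ring
  rw [harg]
  by_cases h2 : gv < (tb.length : Int) - b
  · rw [if_pos h2]
    by_cases h3 : (td.length : Int) ≤ gv
    · rw [if_pos h3]
      symm
      apply List.sum_eq_zero
      intro x hx
      rw [List.mem_map] at hx
      obtain ⟨c, _, rfl⟩ := hx
      apply List.sum_eq_zero
      intro y hy
      rw [List.mem_map] at hy
      obtain ⟨gh, _, rfl⟩ := hy
      rw [if_neg (by rintro ⟨_, u, _, _, _, _⟩; omega)]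
    · rw [if_neg h3, pv_A_c_rect ta tb tc td a (b + gv) gv (by omega)]
      apply congrArg
      apply List.map_congr_left
      intro c _
      apply congrArg
      apply List.map_congr_left
      intro gh _
      refine if_congr ?_ rfl rfl
      constructor
      · rintro ⟨u1, u2, u3, u4⟩; exact ⟨by omega, by omega, u1, u2, u3, u4⟩
      · rintro ⟨_, _, u1, u2, u3, u4⟩; exact ⟨u1, u2, u3, u4⟩
  · rw [if_neg h2]
    symm
    apply List.sum_eq_zero
    intro x hx
    rw [List.mem_map] at hx
    obtain ⟨c, _, rfl⟩ := hx
    apply List.sum_eq_zero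
    intro y hy
    rw [List.mem_map] at hy
    obtain ⟨gh, _, rfl⟩ := hy
    rw [if_neg (by rintro ⟨u, _, _, _, _, _⟩; omega)]

theorem pv_guard_into1 (P : Prop) [Decidable P] (l : List Int)
    (Q : Int → Prop) [inst : ∀ z, Decidable (Q z)] :
    (if P then (l.map (fun z => if Q z then (1 : Int) else 0)).sum else 0)
      = (l.map (fun z => if P ∧ Q z then (1 : Int) else 0)).sum := by
  by_cases h : P
  · simp [h]
  · simp [h]

theorem pv_swap2 (l1 l2 : List Int) (F : Int → Int → Int) :
    (l1.map (fun x => (l2.map (fun y => F x y)).sum)).sum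
      = (l2.map (fun y => (l1.map (fun x => F x y)).sum)).sum :=
  pv_sum_map_comm l1 l2 F

theorem pv_swap6 (la lb lgv lc lgh le : List Int) (F : Int → Int → Int → Int → Int → Int → Int) :
    (la.map (fun a => (lb.map (fun b => (lgv.map (fun gv => (lc.map (fun c =>
        (lgh.map (fun gh => (le.map (fun e => F a b gv c gh e)).sum)).sum)).sum)).sum)).sum)).sum
      = (lgv.map (fun gv => (lgh.map (fun gh => (la.map (fun a => (lb.map (fun b =>
          (lc.map (fun c => (le.map (fun e => F a b gv c gh e)).sum)).sum)).sum)).sum)).sum)).sum := by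
  -- (a,b,gv,c,gh) → (a,gv,b,c,gh)
  have s1 : ∀ a, (lb.map (fun b => (lgv.map (fun gv => (lc.map (fun c =>
        (lgh.map (fun gh => (le.map (fun e => F a b gv c gh e)).sum)).sum)).sum)).sum)).sum
      = (lgv.map (fun gv => (lb.map (fun b => (lc.map (fun c =>
        (lgh.map (fun gh => (le.map (fun e => F a b gv c gh e)).sum)).sum)).sum)).sum)).sum := by
    intro a
    exact pv_swap2 lb lgv (fun b gv => (lc.map (fun c =>
      (lgh.map (fun gh => (le.map (fun e => F a b gv c gh e)).sum)).sum)).sum)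
  rw [List.map_congr_left (fun a _ => s1 a)]
  -- (a,gv,…) → (gv,a,…)
  rw [pv_swap2 la lgv (fun a gv => (lb.map (fun b => (lc.map (fun c =>
    (lgh.map (fun gh => (le.map (fun e => F a b gv c gh e)).sum)).sum)).sum)).sum)]
  apply congrArg
  apply List.map_congr_left
  intro gv _
  -- per gv : (a,b,c,gh) → (gh,a,b,c)
  have s2 : ∀ a b, (lc.map (fun c => (lgh.map (fun gh =>
        (le.map (fun e => F a b gv c gh e)).sum)).sum)).sum
      = (lgh.map (fun gh => (lc.map (fun c =>
        (le.map (fun e => F a b gv c gh e)).sum)).sum)).sum := by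
    intro a b
    exact pv_swap2 lc lgh (fun c gh => (le.map (fun e => F a b gv c gh e)).sum)
  have s3 : ∀ a, (lb.map (fun b => (lc.map (fun c => (lgh.map (fun gh =>
        (le.map (fun e => F a b gv c gh e)).sum)).sum)).sum)).sum
      = (lgh.map (fun gh => (lb.map (fun b => (lc.map (fun c =>
        (le.map (fun e => F a b gv c gh e)).sum)).sum)).sum)).sum := by
    intro a
    rw [List.map_congr_left (fun b _ => s2 a b)]
    exact pv_swap2 lb lgh (fun b gh => (lc.map (fun c =>
      (le.map (fun e => F a b gv c gh e)).sum)).sum)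
  rw [List.map_congr_left (fun a _ => s3 a)]
  exact pv_swap2 la lgh (fun a gh => (lb.map (fun b => (lc.map (fun c =>
    (le.map (fun e => F a b gv c gh e)).sum)).sum)).sum)

theorem pv_zero3 (l1 l2 l3 : List Int) (F : Int → Int → Int → Int)
    (h : ∀ x y z, F x y z = 0) :
    (l1.map (fun x => (l2.map (fun y => (l3.map (fun z => F x y z)).sum)).sum)).sum = 0 := by
  apply List.sum_eq_zero
  intro u hu
  rw [List.mem_map] at hu
  obtain ⟨x, _, rfl⟩ := hu
  apply List.sum_eq_zero
  intro v hv
  rw [List.mem_map] at hv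
  obtain ⟨y, _, rfl⟩ := hv
  apply List.sum_eq_zero
  intro w hw
  rw [List.mem_map] at hw
  obtain ⟨z, _, rfl⟩ := hw
  exact h x y z

theorem pv_zero4 (l1 l2 l3 l4 : List Int) (F : Int → Int → Int → Int → Int)
    (h : ∀ x y z w, F x y z w = 0) :
    (l1.map (fun x => (l2.map (fun y => (l3.map (fun z => (l4.map (fun w => F x y z w)).sum)).sum)).sum)).sum = 0 := by
  apply List.sum_eq_zero
  intro u hu
  rw [List.mem_map] at hu
  obtain ⟨x, _, rfl⟩ := hu
  exact pv_zero3 l2 l3 l4 (F x) (h x)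

theorem pv_A_rect5 (ta tb tc td : List Char) :
    C_a ta tb tc td
      = ((PySem.List.pyRange 0 ((ta.length : Int)) 1).map (fun a =>
          ((PySem.List.pyRange 0 ((tb.length : Int)) 1).map (fun b =>
            ((PySem.List.pyRange 2 ((tb.length : Int)) 1).map (fun gv =>
              ((PySem.List.pyRange 0 ((tc.length : Int)) 1).map (fun c =>
                ((PySem.List.pyRange 2 ((tc.length : Int)) 1).map (fun gh =>
                  if (a < (ta.length : Int) - 2 ∧ b < (tb.length : Int) - 2 ∧
                      PySem.List.pyGetD tb b ' ' = PySem.List.pyGetD ta a ' ' ∧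
                      b + gv < (tb.length : Int) ∧ gv < (td.length : Int) ∧
                      c < (tc.length : Int) - 2 ∧
                      PySem.List.pyGetD tc c ' ' = PySem.List.pyGetD tb (b + gv) ' ' ∧
                      c + gh < (tc.length : Int) ∧ a + gh < (ta.length : Int))
                  then pvE ta tc td a c gv gh else 0)).sum)).sum)).sum)).sum)).sum := by
  unfold C_a C_b
  rw [pv_sum_ext 0 ((ta.length : Int) - 2) ((ta.length : Int)) (by omega)]
  apply congrArg
  apply List.map_congr_left
  intro a ha
  rw [PySem.List.mem_pyRange_one] at ha
  by_cases ha2 : a < (ta.length : Int) - 2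
  · rw [if_pos ha2, pv_sum_ext 0 ((tb.length : Int) - 2) ((tb.length : Int)) (by omega)]
    apply congrArg
    apply List.map_congr_left
    intro b hb
    rw [PySem.List.mem_pyRange_one] at hb
    by_cases hb2 : b < (tb.length : Int) - 2
    · rw [if_pos hb2]
      by_cases hch : PySem.List.pyGetD tb b ' ' = PySem.List.pyGetD ta a ' '
      · rw [if_pos hch, pv_A_b2_rect ta tb tc td a b (by omega)]
        apply congrArg
        apply List.map_congr_left
        intro gv _
        apply congrArg
        apply List.map_congr_left
        intro c _
        apply congrArg
        apply List.map_congr_left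
        intro gh _
        refine if_congr ?_ rfl rfl
        constructor
        · rintro ⟨u1, u2, u3, u4, u5, u6⟩
          exact ⟨ha2, hb2, hch, u1, u2, u3, u4, u5, u6⟩
        · rintro ⟨_, _, _, u1, u2, u3, u4, u5, u6⟩
          exact ⟨u1, u2, u3, u4, u5, u6⟩
      · rw [if_neg hch]
        symm
        apply pv_zero3
        intro gv c gh
        rw [if_neg (by rintro ⟨_, _, u, _⟩; exact hch u)]
    · rw [if_neg hb2]
      symm
      apply pv_zero3
      intro gv c gh
      rw [if_neg (by rintro ⟨_, u, _⟩; exact hb2 u)]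
  · rw [if_neg ha2]
    symm
    apply pv_zero4
    intro b gv c gh
    rw [if_neg (by rintro ⟨u, _⟩; exact ha2 u)]

theorem pv_Ca_Can (ta tb tc td : List Char) : C_a ta tb tc td = pvCan ta tb tc td := by
  rw [pv_A_rect5]
  unfold pvCan pvW
  rw [← pv_swap6 (PySem.List.pyRange 0 ((ta.length : Int)) 1) (PySem.List.pyRange 0 ((tb.length : Int)) 1)
      (PySem.List.pyRange 2 ((tb.length : Int)) 1) (PySem.List.pyRange 0 ((tc.length : Int)) 1)
      (PySem.List.pyRange 2 ((tc.length : Int)) 1) (PySem.List.pyRange 0 ((td.length : Int)) 1)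
      (fun a b gv c gh e =>
        if (a + gh < (ta.length : Int) ∧ b + gv < (tb.length : Int) ∧
            c + gh < (tc.length : Int) ∧ e + gv < (td.length : Int) ∧
            PySem.List.pyGetD ta a ' ' = PySem.List.pyGetD tb b ' ' ∧
            PySem.List.pyGetD tc c ' ' = PySem.List.pyGetD tb (b + gv) ' ' ∧
            PySem.List.pyGetD td (gv + e) ' ' = PySem.List.pyGetD tc (c + gh) ' ' ∧
            PySem.List.pyGetD td e ' ' = PySem.List.pyGetD ta (a + gh) ' ')
        then (1 : Int) else 0)]
  apply congrArg
  apply List.map_congr_left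
  intro a _
  apply congrArg
  apply List.map_congr_left
  intro b _
  apply congrArg
  apply List.map_congr_left
  intro gv hgv
  rw [PySem.List.mem_pyRange_one] at hgv
  apply congrArg
  apply List.map_congr_left
  intro c _
  apply congrArg
  apply List.map_congr_left
  intro gh hgh
  rw [PySem.List.mem_pyRange_one] at hgh
  unfold pvE
  rw [pv_guard_into1]
  apply congrArg
  apply List.map_congr_left
  intro e he
  rw [PySem.List.mem_pyRange_one] at he
  refine if_congr ?_ rfl rfl
  constructor
  · rintro ⟨⟨u1, u2, u3, u4, u5, u6, u7, u8, u9⟩, v1, v2, v3⟩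
    exact ⟨u9, u4, u8, v1, u3.symm, u7, v2, v3⟩
  · rintro ⟨w1, w2, w3, w4, w5, w6, w7, w8⟩
    exact ⟨⟨by omega, by omega, w5.symm, w2, by omega, by omega, w6, w3, w1⟩, w4, w7, w8⟩

theorem pv_guard_into2 (P : Prop) [Decidable P] (l1 l2 : List Int)
    (Q : Int → Int → Prop) [inst : ∀ x y, Decidable (Q x y)] :
    (if P then (l1.map (fun x => (l2.map (fun y => if Q x y then (1 : Int) else 0)).sum)).sum else 0)
      = (l1.map (fun x => (l2.map (fun y => if P ∧ Q x y then (1 : Int) else 0)).sum)).sum := by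
  by_cases h : P <;> simp [h]

theorem pv_guard_into3 (P : Prop) [Decidable P] (l1 l2 l3 : List Int)
    (Q : Int → Int → Int → Prop) [inst : ∀ x y z, Decidable (Q x y z)] :
    (if P then (l1.map (fun x => (l2.map (fun y => (l3.map (fun z =>
        if Q x y z then (1 : Int) else 0)).sum)).sum)).sum else 0)
      = (l1.map (fun x => (l2.map (fun y => (l3.map (fun z =>
          if P ∧ Q x y z then (1 : Int) else 0)).sum)).sum)).sum := by
  by_cases h : P <;> simp [h]

theorem pv_swap4 (lb le la lc : List Int) (F : Int → Int → Int → Int → Int) :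
    (lb.map (fun b => (le.map (fun e => (la.map (fun a =>
        (lc.map (fun c => F b e a c)).sum)).sum)).sum)).sum
      = (la.map (fun a => (lb.map (fun b => (lc.map (fun c =>
          (le.map (fun e => F b e a c)).sum)).sum)).sum)).sum := by
  -- (b,e,a,c) → (b,a,e,c)
  have s1 : ∀ b, (le.map (fun e => (la.map (fun a => (lc.map (fun c => F b e a c)).sum)).sum)).sum
      = (la.map (fun a => (le.map (fun e => (lc.map (fun c => F b e a c)).sum)).sum)).sum := by
    intro b
    exact pv_swap2 le la (fun e a => (lc.map (fun c => F b e a c)).sum)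
  rw [List.map_congr_left (fun b _ => s1 b)]
  -- (b,a,e,c) → (b,a,c,e)
  have s2 : ∀ b, (la.map (fun a => (le.map (fun e => (lc.map (fun c => F b e a c)).sum)).sum)).sum
      = (la.map (fun a => (lc.map (fun c => (le.map (fun e => F b e a c)).sum)).sum)).sum := by
    intro b
    apply congrArg
    apply List.map_congr_left
    intro a _
    exact pv_swap2 le lc (fun e c => F b e a c)
  rw [List.map_congr_left (fun b _ => s2 b)]
  -- (b,a,…) → (a,b,…)
  exact pv_swap2 lb la (fun b a => (lc.map (fun c => (le.map (fun e => F b e a c)).sum)).sum)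

theorem pv_mid (ta tb tc td : List Char) (gv gh : Int) (hgv : 2 ≤ gv) (hgh : 2 ≤ gh) :
    ((PySem.List.pyRange 0 ((tb.length : Int) - gv) 1).map (fun b =>
      ((PySem.List.pyRange 0 ((td.length : Int) - gv) 1).map (fun e =>
        ((PySem.List.pyRange 0 ((ta.length : Int) - gh) 1).map (fun a =>
          ((PySem.List.pyRange 0 ((tc.length : Int) - gh) 1).map (fun c =>
            if (keyP ta gh a = (PySem.List.pyGetD tb b ' ', PySem.List.pyGetD td e ' ') ∧
                keyP tc gh c = (PySem.List.pyGetD tb (b + gv) ' ', PySem.List.pyGetD td (e + gv) ' '))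
            then (1 : Int) else 0)).sum)).sum)).sum)).sum
      = pvW ta tb tc td gv gh := by
  -- extend the four truncated ranges to the full rectangles, pushing the bounds as guards
  have hac : ∀ b e,
      ((PySem.List.pyRange 0 ((ta.length : Int) - gh) 1).map (fun a =>
        ((PySem.List.pyRange 0 ((tc.length : Int) - gh) 1).map (fun c =>
          if (keyP ta gh a = (PySem.List.pyGetD tb b ' ', PySem.List.pyGetD td e ' ') ∧
              keyP tc gh c = (PySem.List.pyGetD tb (b + gv) ' ', PySem.List.pyGetD td (e + gv) ' '))
          then (1 : Int) else 0)).sum)).sum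
      = ((PySem.List.pyRange 0 ((ta.length : Int)) 1).map (fun a =>
          ((PySem.List.pyRange 0 ((tc.length : Int)) 1).map (fun c =>
            if (a < (ta.length : Int) - gh ∧ c < (tc.length : Int) - gh ∧
                keyP ta gh a = (PySem.List.pyGetD tb b ' ', PySem.List.pyGetD td e ' ') ∧
                keyP tc gh c = (PySem.List.pyGetD tb (b + gv) ' ', PySem.List.pyGetD td (e + gv) ' '))
            then (1 : Int) else 0)).sum)).sum := by
    intro b e
    rw [pv_sum_ext 0 ((ta.length : Int) - gh) ((ta.length : Int)) (by omega)]
    apply congrArg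
    apply List.map_congr_left
    intro a _
    rw [pv_guard_into1 (a < (ta.length : Int) - gh),
        pv_sum_ext 0 ((tc.length : Int) - gh) ((tc.length : Int)) (by omega)]
    apply congrArg
    apply List.map_congr_left
    intro c _
    rw [pv_ite_and]
    refine if_congr ?_ rfl rfl
    constructor
    · rintro ⟨u1, u2, u3⟩; exact ⟨u2, u1, u3⟩
    · rintro ⟨u1, u2, u3⟩; exact ⟨u2, u1, u3⟩
  have hbe :
      ((PySem.List.pyRange 0 ((tb.length : Int) - gv) 1).map (fun b =>
        ((PySem.List.pyRange 0 ((td.length : Int) - gv) 1).map (fun e =>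
          ((PySem.List.pyRange 0 ((ta.length : Int)) 1).map (fun a =>
            ((PySem.List.pyRange 0 ((tc.length : Int)) 1).map (fun c =>
              if (a < (ta.length : Int) - gh ∧ c < (tc.length : Int) - gh ∧
                  keyP ta gh a = (PySem.List.pyGetD tb b ' ', PySem.List.pyGetD td e ' ') ∧
                  keyP tc gh c = (PySem.List.pyGetD tb (b + gv) ' ', PySem.List.pyGetD td (e + gv) ' '))
              then (1 : Int) else 0)).sum)).sum)).sum)).sum
      = ((PySem.List.pyRange 0 ((tb.length : Int)) 1).map (fun b =>
          ((PySem.List.pyRange 0 ((td.length : Int)) 1).map (fun e =>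
            ((PySem.List.pyRange 0 ((ta.length : Int)) 1).map (fun a =>
              ((PySem.List.pyRange 0 ((tc.length : Int)) 1).map (fun c =>
                if (b < (tb.length : Int) - gv ∧ e < (td.length : Int) - gv ∧
                    a < (ta.length : Int) - gh ∧ c < (tc.length : Int) - gh ∧
                    keyP ta gh a = (PySem.List.pyGetD tb b ' ', PySem.List.pyGetD td e ' ') ∧
                    keyP tc gh c = (PySem.List.pyGetD tb (b + gv) ' ', PySem.List.pyGetD td (e + gv) ' '))
                then (1 : Int) else 0)).sum)).sum)).sum)).sum := by
    rw [pv_sum_ext 0 ((tb.length : Int) - gv) ((tb.length : Int)) (by omega)]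
    apply congrArg
    apply List.map_congr_left
    intro b _
    rw [pv_guard_into3 (b < (tb.length : Int) - gv),
        pv_sum_ext 0 ((td.length : Int) - gv) ((td.length : Int)) (by omega)]
    apply congrArg
    apply List.map_congr_left
    intro e _
    rw [pv_guard_into2 (e < (td.length : Int) - gv)]
    apply congrArg
    apply List.map_congr_left
    intro a _
    apply congrArg
    apply List.map_congr_left
    intro c _
    refine if_congr ?_ rfl rfl
    constructor
    · rintro ⟨u1, u2, u3, u4, u5, u6⟩; exact ⟨u2, u1, u3, u4, u5, u6⟩
    · rintro ⟨u1, u2, u3, u4, u5, u6⟩; exact ⟨u2, u1, u3, u4, u5, u6⟩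
  rw [List.map_congr_left (fun b _ => congrArg List.sum (List.map_congr_left (fun e _ => hac b e))), hbe,
      pv_swap4 (PySem.List.pyRange 0 ((tb.length : Int)) 1) (PySem.List.pyRange 0 ((td.length : Int)) 1)
        (PySem.List.pyRange 0 ((ta.length : Int)) 1) (PySem.List.pyRange 0 ((tc.length : Int)) 1)
        (fun b e a c =>
          if (b < (tb.length : Int) - gv ∧ e < (td.length : Int) - gv ∧
              a < (ta.length : Int) - gh ∧ c < (tc.length : Int) - gh ∧
              keyP ta gh a = (PySem.List.pyGetD tb b ' ', PySem.List.pyGetD td e ' ') ∧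
              keyP tc gh c = (PySem.List.pyGetD tb (b + gv) ' ', PySem.List.pyGetD td (e + gv) ' '))
          then (1 : Int) else 0)]
  unfold pvW
  apply congrArg
  apply List.map_congr_left
  intro a _
  apply congrArg
  apply List.map_congr_left
  intro b _
  apply congrArg
  apply List.map_congr_left
  intro c _
  apply congrArg
  apply List.map_congr_left
  intro e _
  refine if_congr ?_ rfl rfl
  simp only [keyP, Prod.mk.injEq]
  constructor
  · rintro ⟨u1, u2, u3, u4, ⟨k1, k2⟩, ⟨k3, k4⟩⟩
    refine ⟨by omega, by omega, by omega, by omega, k1, k3, ?_, k2.symm⟩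
    rw [show gv + e = e + gv from by ring]
    exact k4.symm
  · rintro ⟨w1, w2, w3, w4, w5, w6, w7, w8⟩
    refine ⟨by omega, by omega, by omega, by omega, ⟨w5, w8.symm⟩, ⟨w6, ?_⟩⟩
    rw [show e + gv = gv + e from by ring]
    exact w7.symm

theorem pv_Bas_W (ta tb tc td : List Char) (gv gh : Int) (hgv : 2 ≤ gv) (hgh : 2 ≤ gh) :
    ((pairtab tb gv).items.map (fun p =>
      ((pairtab td gv).items.map (fun q =>
        p.2 * q.2 * (pairtab ta gh).getD (p.1.1, q.1.1) 0
          * (pairtab tc gh).getD (p.1.2, q.1.2) 0)).sum)).sum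
      = pvW ta tb tc td gv gh := by
  have hT : ∀ z : Char × Char, (pairtab ta gh).getD z 0
      = ((PySem.List.pyRange 0 ((ta.length : Int) - gh) 1).map
          (fun a => if keyP ta gh a = z then (1 : Int) else 0)).sum := by
    intro z
    rw [pv_pairtab ta gh, PySem.Dict.getD_counter, pv_count_sum, List.map_map]
    rfl
  have hB : ∀ z : Char × Char, (pairtab tc gh).getD z 0
      = ((PySem.List.pyRange 0 ((tc.length : Int) - gh) 1).map
          (fun c => if keyP tc gh c = z then (1 : Int) else 0)).sum := by
    intro z
    rw [pv_pairtab tc gh, PySem.Dict.getD_counter, pv_count_sum, List.map_map]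
    rfl
  have hq : ∀ x : Char × Char,
      ((pairtab td gv).items.map (fun q =>
        q.2 * ((pairtab ta gh).getD (x.1, q.1.1) 0 * (pairtab tc gh).getD (x.2, q.1.2) 0))).sum
      = ((PySem.List.pyRange 0 ((td.length : Int) - gv) 1).map (fun e =>
          (pairtab ta gh).getD (x.1, (keyP td gv e).1) 0
            * (pairtab tc gh).getD (x.2, (keyP td gv e).2) 0)).sum := by
    intro x
    rw [pv_pairtab td gv]
    refine (pv_counter_items_sum
        ((PySem.List.pyRange 0 ((td.length : Int) - gv) 1).map (fun p => keyP td gv p))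
        (fun y : Char × Char =>
          (pairtab ta gh).getD (x.1, y.1) 0 * (pairtab tc gh).getD (x.2, y.2) 0)).trans ?_
    rw [List.map_map]
    rfl
  have hp : ∀ p : (Char × Char) × Int,
      ((pairtab td gv).items.map (fun q =>
        p.2 * q.2 * (pairtab ta gh).getD (p.1.1, q.1.1) 0
          * (pairtab tc gh).getD (p.1.2, q.1.2) 0)).sum
      = p.2 * ((PySem.List.pyRange 0 ((td.length : Int) - gv) 1).map (fun e =>
          (pairtab ta gh).getD (p.1.1, (keyP td gv e).1) 0
            * (pairtab tc gh).getD (p.1.2, (keyP td gv e).2) 0)).sum := by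
    intro p
    rw [← hq p.1, pv_mul_sum]
    apply congrArg
    apply List.map_congr_left
    intro q _
    ring
  rw [List.map_congr_left (fun p _ => hp p), pv_pairtab tb gv]
  refine (pv_counter_items_sum
      ((PySem.List.pyRange 0 ((tb.length : Int) - gv) 1).map (fun p => keyP tb gv p))
      (fun x : Char × Char =>
        ((PySem.List.pyRange 0 ((td.length : Int) - gv) 1).map (fun e =>
          (pairtab ta gh).getD (x.1, (keyP td gv e).1) 0
            * (pairtab tc gh).getD (x.2, (keyP td gv e).2) 0)).sum)).trans ?_
  rw [List.map_map, ← pv_mid ta tb tc td gv gh hgv hgh]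
  apply congrArg
  apply List.map_congr_left
  intro b _
  simp only [Function.comp]
  apply congrArg
  apply List.map_congr_left
  intro e _
  simp only [keyP]
  rw [hT (PySem.List.pyGetD tb b ' ', PySem.List.pyGetD td e ' '),
      hB (PySem.List.pyGetD tb (b + gv) ' ', PySem.List.pyGetD td (e + gv) ' '),
      pv_sum_mul_sum]
  apply congrArg
  apply List.map_congr_left
  intro a _
  apply congrArg
  apply List.map_congr_left
  intro c _
  exact pv_ite_mul _ _

def pvBas (ta tb tc td : List Char) : Int :=
  ((PySem.List.pyRange 2 ((tb.length : Int)) 1).map (fun gv =>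
    ((PySem.List.pyRange 2 ((tc.length : Int)) 1).map (fun gh =>
      ((pairtab tb gv).items.map (fun p =>
        ((pairtab td gv).items.map (fun q =>
          p.2 * q.2 * (pairtab ta gh).getD (p.1.1, q.1.1) 0
            * (pairtab tc gh).getD (p.1.2, q.1.2) 0)).sum)).sum)).sum)).sum

theorem pv_Bas_Can (ta tb tc td : List Char) : pvBas ta tb tc td = pvCan ta tb tc td := by
  unfold pvBas pvCan
  apply congrArg
  apply List.map_congr_left
  intro gv hgv
  rw [PySem.List.mem_pyRange_one] at hgv
  apply congrArg
  apply List.map_congr_left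
  intro gh hgh
  rw [PySem.List.mem_pyRange_one] at hgh
  exact pv_Bas_W ta tb tc td gv gh hgv.1 hgh.1

theorem pv_items_fold (L R : List ((Char × Char) × Int)) (top bot : PySem.Dict (Char × Char) Int)
    (total : Int) :
    L.foldl (fun t p => R.foldl (fun t q =>
        t + p.2 * q.2 * top.getD (p.1.1, q.1.1) 0 * bot.getD (p.1.2, q.1.2) 0) t) total
      = total + (L.map (fun p => (R.map (fun q =>
          p.2 * q.2 * top.getD (p.1.1, q.1.1) 0 * bot.getD (p.1.2, q.1.2) 0)).sum)).sum := by
  rw [PySem.List.foldl_congr_mem L _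
    (fun t p => t + (R.map (fun q =>
      p.2 * q.2 * top.getD (p.1.1, q.1.1) 0 * bot.getD (p.1.2, q.1.2) 0)).sum) total
    (by intro acc p _; exact PySem.List.foldl_add _ _ _)]
  exact PySem.List.foldl_add _ _ _

theorem pv_Bqel (ta tb tc td : List Char) (total : Int) :
    (PySem.List.pyRange 2 ((tb.length : Int)) 1).foldl (fun total gv =>
      (PySem.List.pyRange 2 ((tc.length : Int)) 1).foldl (fun total gh =>
        (pairtab tb gv).items.foldl (fun total p =>
          (pairtab td gv).items.foldl (fun total q =>
            total + p.2 * q.2 * (pairtab ta gh).getD (p.1.1, q.1.1) 0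
                  * (pairtab tc gh).getD (p.1.2, q.1.2) 0)
            total)
          total)
        total)
      total
      = total + pvBas ta tb tc td := by
  unfold pvBas
  rw [PySem.List.foldl_congr_mem _ _
    (fun total gv => total +
      ((PySem.List.pyRange 2 ((tc.length : Int)) 1).map (fun gh =>
        ((pairtab tb gv).items.map (fun p =>
          ((pairtab td gv).items.map (fun q =>
            p.2 * q.2 * (pairtab ta gh).getD (p.1.1, q.1.1) 0
              * (pairtab tc gh).getD (p.1.2, q.1.2) 0)).sum)).sum)).sum) total ?hgv]
  · exact PySem.List.foldl_add _ _ _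
  case hgv =>
    intro acc gv _
    dsimp only
    rw [PySem.List.foldl_congr_mem _ _
      (fun total gh => total +
        ((pairtab tb gv).items.map (fun p =>
          ((pairtab td gv).items.map (fun q =>
            p.2 * q.2 * (pairtab ta gh).getD (p.1.1, q.1.1) 0
              * (pairtab tc gh).getD (p.1.2, q.1.2) 0)).sum)).sum) acc
      (by intro acc2 gh _; exact pv_items_fold _ _ _ _ acc2)]
    exact PySem.List.foldl_add _ _ _

theorem pv_B_eq (words : List String) : solution_alt words = canonS words := by
  unfold solution_alt canonS
  rw [PySem.List.foldl_congr_mem _ _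
    (fun total i => total +
      ((PySem.List.pyRange 0 4 1).map (fun j => if j = i then 0 else
        ((PySem.List.pyRange 0 4 1).map (fun k => if k = i ∨ k = j then 0 else
          C_a (wl words i) (wl words j) (wl words k) (wl words (6 - i - j - k)))).sum)).sum) 0 ?hi]
  · rw [PySem.List.foldl_add, zero_add]
  case hi =>
    intro acc i _
    dsimp only
    rw [PySem.List.foldl_congr_mem _ _
      (fun total j => if j = i then total else total +
        ((PySem.List.pyRange 0 4 1).map (fun k => if k = i ∨ k = j then 0 else
          C_a (wl words i) (wl words j) (wl words k) (wl words (6 - i - j - k)))).sum) _ ?hj]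
    · rw [pv_foldl_guard_add _ (fun j => j = i)]
    case hj =>
      intro acc2 j _
      dsimp only
      by_cases hj : j = i
      · rw [if_pos hj, if_pos hj]
      · rw [if_neg hj, if_neg hj]
        rw [PySem.List.foldl_congr_mem _ _
          (fun total k => if k = i ∨ k = j then total else total +
            C_a (wl words i) (wl words j) (wl words k) (wl words (6 - i - j - k))) _ ?hk]
        · rw [pv_foldl_guard_add _ (fun k => k = i ∨ k = j)]
        case hk =>
          intro acc3 k _
          dsimp only
          by_cases hk : k = i ∨ k = j
          · rw [if_pos hk, if_pos hk]
          · rw [if_neg hk, if_neg hk]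
            have hwl : ∀ t : Int, (PySem.List.pyGetD words t "").toList = wl words t :=
              fun _ => rfl
            rw [hwl i, hwl j, hwl k, hwl (6 - i - j - k)]
            rw [pv_Bqel (wl words i) (wl words j) (wl words k) (wl words (6 - i - j - k)) acc3,
                pv_Bas_Can, ← pv_Ca_Can]

-- ===== VERDICT (by name: the statement is the Claim_ definition above) =====
theorem solution_spec : Claim_equal_solution := by
  intro words _ _
  unfold Spec_solution
  rw [pv_A_eq, pv_AB_A, pv_B_eq]
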